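-- pv_equiv track=rewrite | github.com/CatfishW/Sprin2026ReasonBench | scripts/update_status_snapshot.py | _extract_log_signals
-- ===== SOURCE A (Python) =====
-- def _extract_log_signals(lines: list[str]) -> tuple[str, str]:
--     last_progress = ""
--     last_error = ""
--     for line in reversed(lines):
--         if not last_progress and "progress total=" in line:
--             last_progress = line
--         if not last_error and "error example_id=" in line:
--             last_error = line
--         if last_progress and last_error:
--             break
--     return last_progress, last_error
-- ===== SOURCE B (Python) =====
-- def _extract_log_signals(lines: list[str]) -> tuple[str, str]:
--     last_progress = next((l for l in reversed(lines) if "progress total=" in l), "")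
--     last_error = next((l for l in reversed(lines) if "error example_id=" in l), "")
--     return last_progress, last_error
-- ===== Notes on version B (the rewrite author's own statement) =====
-- stated objective: simpler
-- what changed: Replaces the single interleaved stateful loop with early break by two independent reverse next() searches, one per signal.
import Mathlib
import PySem

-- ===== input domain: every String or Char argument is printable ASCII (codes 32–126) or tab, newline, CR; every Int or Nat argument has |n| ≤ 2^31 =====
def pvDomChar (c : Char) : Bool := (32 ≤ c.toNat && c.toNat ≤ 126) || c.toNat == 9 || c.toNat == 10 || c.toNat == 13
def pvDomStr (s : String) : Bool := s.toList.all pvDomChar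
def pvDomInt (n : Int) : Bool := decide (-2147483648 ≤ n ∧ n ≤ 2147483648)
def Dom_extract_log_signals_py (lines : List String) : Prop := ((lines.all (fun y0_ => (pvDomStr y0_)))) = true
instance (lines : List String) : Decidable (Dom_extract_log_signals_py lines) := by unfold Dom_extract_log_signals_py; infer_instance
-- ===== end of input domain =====

-- B computes the same two signals with two independent reverse searches instead of A's single interleaved loop (objective: simpler).


-- ===== PORT A =====
-- helper: the interleaved loop of A over the reversed list, with early break
def pvLoopA : List String → String → String → String × String
  | [], p, e => (p, e)
  | l :: rest, p, e =>
    let p' := if p = "" ∧ PySem.Str.isIn "progress total=" l = true then l else p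
    let e' := if e = "" ∧ PySem.Str.isIn "error example_id=" l = true then l else e
    if p' ≠ "" ∧ e' ≠ "" then (p', e') else pvLoopA rest p' e'

def extract_log_signals_py (lines : List String) : String × String :=
  pvLoopA lines.reverse "" ""

-- ===== PORT B =====
def extract_log_signals_py_alt (lines : List String) : String × String :=
  ((lines.reverse.find? (fun l => PySem.Str.isIn "progress total=" l)).getD "",
   (lines.reverse.find? (fun l => PySem.Str.isIn "error example_id=" l)).getD "")

-- ===== PRECONDITION & SPEC =====
def Spec_extract_log_signals_py (lines : List String) (out : String × String) : Prop := out = extract_log_signals_py_alt lines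
instance (lines : List String) (out : String × String) : Decidable (Spec_extract_log_signals_py lines out) := by unfold Spec_extract_log_signals_py; infer_instance

-- ===== CLAIM (what is proved, stated in full; the proofs are below) =====
def Claim_equal_extract_log_signals_py : Prop := ∀ (lines : List String), Dom_extract_log_signals_py lines → Spec_extract_log_signals_py lines (extract_log_signals_py lines)

-- ===== LEMMAS AND PROOFS =====

-- ===== VERDICT (by name: the statement is the Claim_ definition above) =====
lemma ne1 {l : String} (h : PySem.Str.isIn "progress total=" l = true) : l ≠ "" := by
  intro hl; rw [hl] at h; exact absurd h (by decide)

lemma ne2 {l : String} (h : PySem.Str.isIn "error example_id=" l = true) : l ≠ "" := by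
  intro hl; rw [hl] at h; exact absurd h (by decide)

lemma pvLoopA_eq (rl : List String) : ∀ (p e : String),
    pvLoopA rl p e =
      ((if p = "" then ((rl.find? (fun l => PySem.Str.isIn "progress total=" l)).getD "") else p),
       (if e = "" then ((rl.find? (fun l => PySem.Str.isIn "error example_id=" l)).getD "") else e)) := by
  induction rl with
  | nil =>
    intro p e
    simp only [pvLoopA, List.find?, Option.getD]
    split <;> split <;> simp_all
  | cons l rest ih =>
    intro p e
    simp only [pvLoopA, List.find?]
    by_cases hp : p = "" <;> by_cases he : e = "" <;>
      by_cases h1 : PySem.Str.isIn "progress total=" l = true <;>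
      by_cases h2 : PySem.Str.isIn "error example_id=" l = true <;>
      first
        | simp_all [ih, ne1 h1, ne2 h2]
        | simp_all [ih, ne1 h1]
        | simp_all [ih, ne2 h2]
        | simp_all [ih]

theorem extract_log_signals_py_spec : Claim_equal_extract_log_signals_py := by
  intro lines _
  unfold Spec_extract_log_signals_py extract_log_signals_py extract_log_signals_py_alt
  simp [pvLoopA_eq]
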